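-- pv_equiv track=rewrite | github.com/ReySouza/EMIT_HMRCNN | matchfilter/matched_filter.py | set_bands_toread
-- ===== SOURCE A (Python) =====
-- def set_bands_toread(channel):
--     overlap = 100; reset_pos = 0 ; num_channel = 200; start_pos=0
--     overall_set = []
--     band_set = []
--     while(start_pos<channel):
--         band_set.append(start_pos)
--         start_pos+=1 ; reset_pos+=1
--         if((reset_pos%num_channel)==0):
--             reset_pos = 0
--             overall_set.append(band_set)
--             band_set = []
--             start_pos = start_pos-overlap
--     overall_set.append(band_set)
--     return overall_set
-- ===== SOURCE B (Python) =====
-- def set_bands_toread(channel):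
--     overall = []
--     start = 0
--     while True:
--         end = min(start + 200, channel)
--         overall.append(list(range(start, end)))
--         if start + 200 <= channel:
--             start += 100
--         else:
--             return overall
-- ===== Notes on version B (the rewrite author's own statement) =====
-- stated objective: simpler
-- what changed: B iterates over window start positions (step 100), emitting each window as range(start, min(start+200, channel)) in one shot, instead of A's per-channel loop that counts reset_pos and rewinds start_pos by the overlap.
import Mathlib
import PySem

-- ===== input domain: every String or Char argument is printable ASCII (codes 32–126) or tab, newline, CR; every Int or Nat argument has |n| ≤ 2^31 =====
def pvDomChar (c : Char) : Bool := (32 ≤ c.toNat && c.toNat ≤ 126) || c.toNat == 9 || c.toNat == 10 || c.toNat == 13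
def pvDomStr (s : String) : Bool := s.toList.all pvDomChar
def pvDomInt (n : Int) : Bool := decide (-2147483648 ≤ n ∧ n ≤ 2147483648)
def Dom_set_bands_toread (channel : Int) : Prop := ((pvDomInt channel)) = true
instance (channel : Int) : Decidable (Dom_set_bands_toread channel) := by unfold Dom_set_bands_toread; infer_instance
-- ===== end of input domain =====

-- B builds each window directly from its start position (one loop iteration per window)
-- instead of A's per-channel-index loop with a reset counter and an overlap rewind: simpler.

-- ===== PORT A =====
-- A's while loop; state = (start_pos, reset_pos, band_set, overall_set); overlap = 100, num_channel = 200.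
-- fuel is only a totality guard: 2*channel.toNat + 400 exceeds the loop's iteration count
-- (each window of ≤ 200 iterations advances the window start by 100).
def setBandsLoop (fuel : Nat) (channel start_pos reset_pos : Int) (band_set : List Int)
    (overall_set : List (List Int)) : List (List Int) :=
  match fuel with
  | 0 => overall_set ++ [band_set]
  | fuel + 1 =>
    if start_pos < channel then
      -- band_set.append(start_pos); start_pos += 1; reset_pos += 1
      if PySem.Int.mod (reset_pos + 1) 200 = 0 then
        -- reset_pos = 0; overall_set.append(band_set); band_set = []; start_pos -= overlap
        setBandsLoop fuel channel (start_pos + 1 - 100) 0 [] (overall_set ++ [band_set ++ [start_pos]])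
      else
        setBandsLoop fuel channel (start_pos + 1) (reset_pos + 1) (band_set ++ [start_pos]) overall_set
    else overall_set ++ [band_set]

def set_bands_toread (channel : Int) : List (List Int) :=
  setBandsLoop (2 * channel.toNat + 400) channel 0 0 [] []

-- ===== PORT B =====
-- B's loop: one iteration per window start (start += 100), window = range(start, min(start+200, channel)).
-- fuel is only a totality guard: channel.toNat exceeds the number of windows.
def setBandsAltLoop (fuel : Nat) (channel start : Int) : List (List Int) :=
  let w := PySem.List.pyRange start (min (start + 200) channel) 1
  match fuel with
  | 0 => [w]
  | fuel + 1 =>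
    if start + 200 ≤ channel then w :: setBandsAltLoop fuel channel (start + 100)
    else [w]

def set_bands_toread_alt (channel : Int) : List (List Int) :=
  setBandsAltLoop channel.toNat channel 0

-- ===== PRECONDITION & SPEC =====
def Spec_set_bands_toread (channel : Int) (out : List (List Int)) : Prop := out = set_bands_toread_alt channel
instance (channel : Int) (out : List (List Int)) : Decidable (Spec_set_bands_toread channel out) := by unfold Spec_set_bands_toread; infer_instance

-- ===== CLAIM (what is proved, stated in full; the proofs are below) =====
def Claim_equal_set_bands_toread : Prop := ∀ (channel : Int), Dom_set_bands_toread channel → Spec_set_bands_toread channel (set_bands_toread channel)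

-- ===== LEMMAS AND PROOFS =====

-- inside a full window (w + 200 ≤ channel): from in-window index j the loop runs to the
-- window boundary, appends the full window and restarts at w + 100 with an empty band.
theorem setBandsLoop_full (channel w : Int) (hfull : w + 200 ≤ channel) :
    ∀ (n : ℕ) (j : Int) (rest : ℕ), j + n = 199 → 0 ≤ j → ∀ (acc : List (List Int)),
      setBandsLoop (n + rest + 1) channel (w + j) j (PySem.List.pyRange w (w + j) 1) acc =
        setBandsLoop rest channel (w + 100) 0 [] (acc ++ [PySem.List.pyRange w (w + 200) 1]) := by
  intro n
  induction n with
  | zero =>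
    intro j rest hj hj0 acc
    have hj' : j = 199 := by omega
    subst hj'
    rw [show 0 + rest + 1 = rest + 1 from by omega]
    rw [setBandsLoop, if_pos (by omega : w + 199 < channel)]
    rw [if_pos (by decide : PySem.Int.mod ((199:Int) + 1) 200 = 0)]
    have happ : PySem.List.pyRange w (w + 199) 1 ++ [w + 199] = PySem.List.pyRange w (w + 200) 1 := by
      have h := PySem.List.pyRange_one_succ_right (show w ≤ w + 199 by omega)
      simp only [show w + 199 + 1 = w + 200 by ring] at h
      rw [h]
    rw [happ, show w + 199 + 1 - 100 = w + 100 by ring]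
  | succ m ih =>
    intro j rest hj hj0 acc
    rw [setBandsLoop, if_pos (by omega : w + j < channel)]
    have hmod : ¬ PySem.Int.mod (j + 1) 200 = 0 := by
      rw [PySem.Int.mod_eq_emod_of_pos (by norm_num)]
      omega
    rw [if_neg hmod]
    have happ : PySem.List.pyRange w (w + j) 1 ++ [w + j] = PySem.List.pyRange w (w + (j + 1)) 1 := by
      have h := PySem.List.pyRange_one_succ_right (show w ≤ w + j by omega)
      simp only [show w + j + 1 = w + (j + 1) by ring] at h
      rw [h]
    have hrec := ih (j + 1) rest (by omega) (by omega) acc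
    rw [show m + 1 + rest = m + rest + 1 from by omega]
    simp only [show w + j + 1 = w + (j + 1) by ring, happ]
    exact hrec

-- inside the last (truncated) window (channel < w + 200): the loop runs until
-- start_pos = channel and the partial band is appended after the loop.
theorem setBandsLoop_partial (channel w : Int) (hpart : channel < w + 200) :
    ∀ (n : ℕ) (j : Int) (rest : ℕ), n = (channel - (w + j)).toNat → 0 ≤ j → w + j ≤ channel →
      ∀ (acc : List (List Int)),
      setBandsLoop (n + rest + 1) channel (w + j) j (PySem.List.pyRange w (w + j) 1) acc =
        acc ++ [PySem.List.pyRange w channel 1] := by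
  intro n
  induction n with
  | zero =>
    intro j rest hn hj0 hle acc
    have heq : w + j = channel := by omega
    rw [show 0 + rest + 1 = rest + 1 from by omega]
    rw [setBandsLoop, if_neg (by omega : ¬ w + j < channel), heq]
  | succ m ih =>
    intro j rest hn hj0 hle acc
    rw [setBandsLoop, if_pos (by omega : w + j < channel)]
    have hmod : ¬ PySem.Int.mod (j + 1) 200 = 0 := by
      rw [PySem.Int.mod_eq_emod_of_pos (by norm_num)]
      omega
    rw [if_neg hmod]
    have happ : PySem.List.pyRange w (w + j) 1 ++ [w + j] = PySem.List.pyRange w (w + (j + 1)) 1 := by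
      have h := PySem.List.pyRange_one_succ_right (show w ≤ w + j by omega)
      simp only [show w + j + 1 = w + (j + 1) by ring] at h
      rw [h]
    have hrec := ih (j + 1) rest (by omega) (by omega) (by omega) acc
    rw [show m + 1 + rest = m + rest + 1 from by omega]
    simp only [show w + j + 1 = w + (j + 1) by ring, happ]
    exact hrec

-- each window of A, starting fresh at window_start = w < channel, produces acc ++ (B from w),
-- for any sufficient fuels.
theorem setBandsLoop_eq_alt (channel : Int) :
    ∀ (n : ℕ), ∀ (w : Int), n = (channel - w).toNat → w < channel →
      ∀ (fuel afuel : ℕ), 2 * n ≤ fuel → n ≤ 100 * afuel + 199 → ∀ (acc : List (List Int)),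
      setBandsLoop fuel channel w 0 [] acc = acc ++ setBandsAltLoop afuel channel w := by
  intro n
  induction n using Nat.strong_induction_on with
  | _ n ih =>
    intro w hn hw fuel afuel hfuel hafuel acc
    by_cases hfull : w + 200 ≤ channel
    · obtain ⟨rest, rfl⟩ : ∃ r, fuel = 199 + r + 1 := ⟨fuel - 200, by omega⟩
      have h0 := setBandsLoop_full channel w hfull 199 0 rest (by norm_num) le_rfl acc
      simp only [add_zero, PySem.List.pyRange_one_eq_nil (le_refl w)] at h0
      rw [h0]
      obtain ⟨af, rfl⟩ : ∃ a, afuel = a + 1 := ⟨afuel - 1, by omega⟩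
      rw [ih (channel - (w + 100)).toNat (by omega) (w + 100) rfl (by omega) rest af
        (by omega) (by omega) (acc ++ [PySem.List.pyRange w (w + 200) 1])]
      conv_rhs => rw [setBandsAltLoop]
      rw [if_pos hfull, min_eq_left (by omega : w + 200 ≤ channel)]
      simp
    · obtain ⟨rest, hr⟩ : ∃ r, fuel = n + r + 1 := ⟨fuel - (n + 1), by omega⟩
      subst hr
      have h0 := setBandsLoop_partial channel w (by omega) n 0 rest
        (by omega) le_rfl (by omega) acc
      simp only [add_zero, PySem.List.pyRange_one_eq_nil (le_refl w)] at h0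
      rw [h0]
      have halt : setBandsAltLoop afuel channel w = [PySem.List.pyRange w channel 1] := by
        match afuel with
        | 0 =>
          rw [setBandsAltLoop, min_eq_right (by omega : channel ≤ w + 200)]
        | a + 1 =>
          rw [setBandsAltLoop, if_neg hfull, min_eq_right (by omega : channel ≤ w + 200)]
      rw [halt]

-- ===== VERDICT (by name: the statement is the Claim_ definition above) =====
theorem set_bands_toread_spec : Claim_equal_set_bands_toread := by
  intro channel _
  unfold Spec_set_bands_toread set_bands_toread set_bands_toread_alt
  by_cases hc : 0 < channel
  · exact setBandsLoop_eq_alt channel channel.toNat 0 (by omega) hc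
      (2 * channel.toNat + 400) channel.toNat (by omega) (by omega) []
  · obtain ⟨f, hf⟩ : ∃ f, 2 * channel.toNat + 400 = f + 1 := ⟨2 * channel.toNat + 399, by omega⟩
    rw [hf, setBandsLoop, if_neg (by omega : ¬ (0:Int) < channel)]
    have hz : channel.toNat = 0 := by omega
    rw [hz, setBandsAltLoop, min_eq_right (by omega : channel ≤ (0:Int) + 200),
      PySem.List.pyRange_one_eq_nil (by omega : channel ≤ (0:Int))]
    simp
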